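-- pv_equiv track=rewrite | github.com/Dando18/audio-summarizer | src/audiosummary/transcribe.py | timestamp_to_millis
-- ===== SOURCE A (Python) =====
-- def timestamp_to_millis(timestamp: str) -> int:
--     """ map a timestamp of the form HH:MM:SS or MM:SS or SS to milliseconds
--     """
--     parts = timestamp.split(":")
--     parts.reverse()
--     millis = 0
--     for i, part in enumerate(parts):
--         seconds = int(part) * (60**i)
--         millis += seconds * 1000
--     return millis
-- ===== SOURCE B (Python) =====
-- def timestamp_to_millis(timestamp: str) -> int:
--     """ map a timestamp of the form HH:MM:SS or MM:SS or SS to milliseconds """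
--     total = 0
--     for part in timestamp.split(":"):
--         total = total * 60 + int(part)
--     return total * 1000
-- ===== Notes on version B (the rewrite author's own statement) =====
-- stated objective: idiomatic
-- what changed: Replaces reverse + enumerate with 60**i positional weighting by a left-to-right Horner fold (total = total*60 + int(part)), dropping the reverse and the exponentiation.
import Mathlib
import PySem

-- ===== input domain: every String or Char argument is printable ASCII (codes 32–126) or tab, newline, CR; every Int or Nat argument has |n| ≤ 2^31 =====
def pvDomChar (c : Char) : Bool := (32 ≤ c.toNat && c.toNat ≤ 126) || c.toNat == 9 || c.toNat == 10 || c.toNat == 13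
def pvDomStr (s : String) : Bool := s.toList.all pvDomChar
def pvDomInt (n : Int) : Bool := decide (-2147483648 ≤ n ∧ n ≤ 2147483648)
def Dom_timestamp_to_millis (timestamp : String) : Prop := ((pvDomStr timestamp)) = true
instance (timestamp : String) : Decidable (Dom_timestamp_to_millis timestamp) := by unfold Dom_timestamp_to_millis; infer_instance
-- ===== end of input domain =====

-- B replaces A's reverse + enumerate + 60**i weighting by a left-to-right Horner fold (total = total*60 + int(part)); same outputs, more idiomatic.

-- ===== PORT A =====
-- str.split(":") with nonempty sep: split? is always some here, getD [] exact.
-- int(part): Pre_ guarantees every part parses, so getD 0 is never the taken branch inside Pre_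
def pvVal (p : String) : Int := (PySem.Int.ofStr? p).getD 0

def timestamp_to_millis (timestamp : String) : Int :=
  let parts := ((PySem.Str.split? timestamp ":").getD []).reverse
  (PySem.List.enumerate parts 0).foldl
    (fun millis ip => millis + (pvVal ip.2 * 60 ^ ip.1.toNat) * 1000) 0

-- ===== PORT B =====
def timestamp_to_millis_alt (timestamp : String) : Int :=
  (((PySem.Str.split? timestamp ":").getD []).foldl (fun total p => total * 60 + pvVal p) 0) * 1000

-- ===== PRECONDITION & SPEC =====
-- Pre_ excludes exactly the inputs where int(part) raises ValueError in Python A (and B alike)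
def Pre_timestamp_to_millis (timestamp : String) : Prop :=
  ∀ p ∈ (PySem.Str.split? timestamp ":").getD [], (PySem.Int.ofStr? p).isSome = true
instance (timestamp : String) : Decidable (Pre_timestamp_to_millis timestamp) := by
  unfold Pre_timestamp_to_millis; infer_instance

def pvWitness_timestamp_to_millis : String := "1:02:03"

def Spec_timestamp_to_millis (timestamp : String) (out : Int) : Prop := out = timestamp_to_millis_alt timestamp
instance (timestamp : String) (out : Int) : Decidable (Spec_timestamp_to_millis timestamp out) := by unfold Spec_timestamp_to_millis; infer_instance

-- ===== CLAIM (what is proved, stated in full; the proofs are below) =====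
def Claim_equal_timestamp_to_millis : Prop := ∀ (timestamp : String), Dom_timestamp_to_millis timestamp → Pre_timestamp_to_millis timestamp → Spec_timestamp_to_millis timestamp (timestamp_to_millis timestamp)

-- ===== LEMMAS AND PROOFS =====
theorem pv_enum_fold (r : List String) :
    ∀ (s : Int), 0 ≤ s → ∀ (acc : Int),
    (PySem.List.enumerate r s).foldl
      (fun millis ip => millis + (pvVal ip.2 * 60 ^ ip.1.toNat) * 1000) acc
    = acc + 1000 * 60 ^ s.toNat * r.foldr (fun p t => pvVal p + 60 * t) 0 := by
  induction r with
  | nil => intro s _ acc; simp [PySem.List.enumerate_nil]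
  | cons x xs ih =>
    intro s hs acc
    rw [PySem.List.enumerate_cons]
    simp only [List.foldl_cons, List.foldr_cons]
    rw [ih (s + 1) (by omega)]
    have h1 : (s + 1).toNat = s.toNat + 1 := by omega
    rw [h1, pow_succ]
    ring

theorem timestamp_to_millis_eq (timestamp : String) :
    timestamp_to_millis timestamp = timestamp_to_millis_alt timestamp := by
  unfold timestamp_to_millis timestamp_to_millis_alt
  rw [pv_enum_fold _ 0 le_rfl 0]
  rw [List.foldr_reverse]
  have : ((PySem.Str.split? timestamp ":").getD []).foldl (fun t p => pvVal p + 60 * t) 0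
       = ((PySem.Str.split? timestamp ":").getD []).foldl (fun total p => total * 60 + pvVal p) 0 := by
    congr 1; funext t p; ring
  rw [this]; norm_num [mul_comm]

-- ===== VERDICT (by name: the statement is the Claim_ definition above) =====
theorem timestamp_to_millis_spec : Claim_equal_timestamp_to_millis := by
  intro timestamp _ _
  exact timestamp_to_millis_eq timestamp
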